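-- pv_equiv track=rewrite | github.com/claudmariut/project_euler | problem_22.py | sum_string_alpha_number
-- ===== SOURCE A (Python) =====
-- def sum_string_alpha_number(string):
--     """Transforms a string in numbers alphabetically and adds them"""
--     sum = 0
--     for character in string:
--         if character == "A":
--             sum += 1
--         elif character == "B":
--             sum += 2
--         elif character == 'C':
--             sum += 3
--         elif character == 'D':
--             sum += 4
--         elif character == 'E':
--             sum += 5
--         elif character == 'F':
--             sum += 6
--         elif character == 'G':
--             sum += 7
--         elif character == 'H':
--             sum += 8
--         elif character == 'I':
--             sum += 9
--         elif character == 'J':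
--             sum += 10
--         elif character == 'K':
--             sum += 11
--         elif character == 'L':
--             sum += 12
--         elif character == 'M':
--             sum += 13
--         elif character == 'N':
--             sum += 14
--         elif character == 'O':
--             sum += 15
--         elif character == 'P':
--             sum += 16
--         elif character == 'Q':
--             sum += 17
--         elif character == 'R':
--             sum += 18
--         elif character == 'S':
--             sum += 19
--         elif character == 'T':
--             sum += 20
--         elif character == 'U':
--             sum += 21
--         elif character == 'V':
--             sum += 22
--         elif character == 'W':
--             sum += 23
--         elif character == 'X':
--             sum += 24
--         elif character == 'Y':
--             sum += 25
--         elif character == 'Z':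
--             sum += 26
--
--     return sum
-- ===== SOURCE B (Python) =====
-- def sum_string_alpha_number(string):
--     """Transforms a string in numbers alphabetically and adds them"""
--     counts = {}
--     for character in string:
--         counts[character] = counts.get(character, 0) + 1
--     total = 0
--     for position, letter in enumerate("ABCDEFGHIJKLMNOPQRSTUVWXYZ", 1):
--         total += position * counts.get(letter, 0)
--     return total
-- ===== Notes on version B (the rewrite author's own statement) =====
-- stated objective: faster
-- what changed: Replaces the 26-branch if/elif scan over the string with a count-then-weighted-sum: one dict pass builds a character frequency table, then the result is the sum of position*count over the fixed 26-letter alphabet.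
import Mathlib
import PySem

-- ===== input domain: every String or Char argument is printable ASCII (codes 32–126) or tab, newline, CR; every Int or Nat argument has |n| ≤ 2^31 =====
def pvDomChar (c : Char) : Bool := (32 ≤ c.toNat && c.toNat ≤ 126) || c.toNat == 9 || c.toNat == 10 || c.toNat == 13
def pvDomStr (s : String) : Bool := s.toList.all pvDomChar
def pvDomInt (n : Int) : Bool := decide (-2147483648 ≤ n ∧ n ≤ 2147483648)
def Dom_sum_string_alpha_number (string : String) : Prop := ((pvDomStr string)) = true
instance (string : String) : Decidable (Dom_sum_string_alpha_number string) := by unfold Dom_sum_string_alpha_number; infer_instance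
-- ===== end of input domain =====

-- B replaces A's 26-branch if/elif scan of the string by a frequency table built in one
-- pass followed by a weighted sum over the fixed 26-letter alphabet (same value, alternative shape).

-- ===== PORT A =====
-- loop body of A: the if/elif chain adding the alphabetical position of character to sum
def pvAStep (s : Int) (c : Char) : Int :=
  if c = 'A' then s + 1 else
  if c = 'B' then s + 2 else
  if c = 'C' then s + 3 else
  if c = 'D' then s + 4 else
  if c = 'E' then s + 5 else
  if c = 'F' then s + 6 else
  if c = 'G' then s + 7 else
  if c = 'H' then s + 8 else
  if c = 'I' then s + 9 else
  if c = 'J' then s + 10 else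
  if c = 'K' then s + 11 else
  if c = 'L' then s + 12 else
  if c = 'M' then s + 13 else
  if c = 'N' then s + 14 else
  if c = 'O' then s + 15 else
  if c = 'P' then s + 16 else
  if c = 'Q' then s + 17 else
  if c = 'R' then s + 18 else
  if c = 'S' then s + 19 else
  if c = 'T' then s + 20 else
  if c = 'U' then s + 21 else
  if c = 'V' then s + 22 else
  if c = 'W' then s + 23 else
  if c = 'X' then s + 24 else
  if c = 'Y' then s + 25 else
  if c = 'Z' then s + 26 else
  s

def sum_string_alpha_number (string : String) : Int :=
  string.toList.foldl pvAStep 0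

-- ===== PORT B =====
-- the alphabet literal "ABCDEFGHIJKLMNOPQRSTUVWXYZ" as its list of characters
def pvAlphabet : List Char := ['A', 'B', 'C', 'D', 'E', 'F', 'G', 'H', 'I', 'J', 'K', 'L', 'M', 'N', 'O', 'P', 'Q', 'R', 'S', 'T', 'U', 'V', 'W', 'X', 'Y', 'Z']

def sum_string_alpha_number_alt (string : String) : Int :=
  let counts : PySem.Dict Char Int :=
    string.toList.foldl (fun d character => d.insert character (d.getD character 0 + 1)) PySem.Dict.empty
  (PySem.List.enumerate pvAlphabet 1).foldl
    (fun total pl => total + pl.1 * counts.getD pl.2 0) 0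

-- ===== PRECONDITION & SPEC =====
def Spec_sum_string_alpha_number (string : String) (out : Int) : Prop := out = sum_string_alpha_number_alt string
instance (string : String) (out : Int) : Decidable (Spec_sum_string_alpha_number string out) := by unfold Spec_sum_string_alpha_number; infer_instance

-- ===== CLAIM (what is proved, stated in full; the proofs are below) =====
def Claim_equal_sum_string_alpha_number : Prop := ∀ (string : String), Dom_sum_string_alpha_number string → Spec_sum_string_alpha_number string (sum_string_alpha_number string)

-- ===== LEMMAS AND PROOFS =====

-- the value A's if/elif chain adds for one character (0 for non-uppercase)
def pvVal (c : Char) : Int :=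
  if c = 'A' then 1 else
  if c = 'B' then 2 else
  if c = 'C' then 3 else
  if c = 'D' then 4 else
  if c = 'E' then 5 else
  if c = 'F' then 6 else
  if c = 'G' then 7 else
  if c = 'H' then 8 else
  if c = 'I' then 9 else
  if c = 'J' then 10 else
  if c = 'K' then 11 else
  if c = 'L' then 12 else
  if c = 'M' then 13 else
  if c = 'N' then 14 else
  if c = 'O' then 15 else
  if c = 'P' then 16 else
  if c = 'Q' then 17 else
  if c = 'R' then 18 else
  if c = 'S' then 19 else
  if c = 'T' then 20 else
  if c = 'U' then 21 else
  if c = 'V' then 22 else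
  if c = 'W' then 23 else
  if c = 'X' then 24 else
  if c = 'Y' then 25 else
  if c = 'Z' then 26 else
  0

theorem pvAStep_eq (s : Int) (c : Char) : pvAStep s c = s + pvVal c := by
  unfold pvAStep pvVal
  by_cases hA : c = 'A'
  · simp only [if_pos hA]
  by_cases hB : c = 'B'
  · simp only [if_neg hA, if_pos hB]
  by_cases hC : c = 'C'
  · simp only [if_neg hA, if_neg hB, if_pos hC]
  by_cases hD : c = 'D'
  · simp only [if_neg hA, if_neg hB, if_neg hC, if_pos hD]
  by_cases hE : c = 'E'
  · simp only [if_neg hA, if_neg hB, if_neg hC, if_neg hD, if_pos hE]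
  by_cases hF : c = 'F'
  · simp only [if_neg hA, if_neg hB, if_neg hC, if_neg hD, if_neg hE, if_pos hF]
  by_cases hG : c = 'G'
  · simp only [if_neg hA, if_neg hB, if_neg hC, if_neg hD, if_neg hE, if_neg hF, if_pos hG]
  by_cases hH : c = 'H'
  · simp only [if_neg hA, if_neg hB, if_neg hC, if_neg hD, if_neg hE, if_neg hF, if_neg hG, if_pos hH]
  by_cases hI : c = 'I'
  · simp only [if_neg hA, if_neg hB, if_neg hC, if_neg hD, if_neg hE, if_neg hF, if_neg hG, if_neg hH, if_pos hI]
  by_cases hJ : c = 'J'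
  · simp only [if_neg hA, if_neg hB, if_neg hC, if_neg hD, if_neg hE, if_neg hF, if_neg hG, if_neg hH, if_neg hI, if_pos hJ]
  by_cases hK : c = 'K'
  · simp only [if_neg hA, if_neg hB, if_neg hC, if_neg hD, if_neg hE, if_neg hF, if_neg hG, if_neg hH, if_neg hI, if_neg hJ, if_pos hK]
  by_cases hL : c = 'L'
  · simp only [if_neg hA, if_neg hB, if_neg hC, if_neg hD, if_neg hE, if_neg hF, if_neg hG, if_neg hH, if_neg hI, if_neg hJ, if_neg hK, if_pos hL]
  by_cases hM : c = 'M'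
  · simp only [if_neg hA, if_neg hB, if_neg hC, if_neg hD, if_neg hE, if_neg hF, if_neg hG, if_neg hH, if_neg hI, if_neg hJ, if_neg hK, if_neg hL, if_pos hM]
  by_cases hN : c = 'N'
  · simp only [if_neg hA, if_neg hB, if_neg hC, if_neg hD, if_neg hE, if_neg hF, if_neg hG, if_neg hH, if_neg hI, if_neg hJ, if_neg hK, if_neg hL, if_neg hM, if_pos hN]
  by_cases hO : c = 'O'
  · simp only [if_neg hA, if_neg hB, if_neg hC, if_neg hD, if_neg hE, if_neg hF, if_neg hG, if_neg hH, if_neg hI, if_neg hJ, if_neg hK, if_neg hL, if_neg hM, if_neg hN, if_pos hO]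
  by_cases hP : c = 'P'
  · simp only [if_neg hA, if_neg hB, if_neg hC, if_neg hD, if_neg hE, if_neg hF, if_neg hG, if_neg hH, if_neg hI, if_neg hJ, if_neg hK, if_neg hL, if_neg hM, if_neg hN, if_neg hO, if_pos hP]
  by_cases hQ : c = 'Q'
  · simp only [if_neg hA, if_neg hB, if_neg hC, if_neg hD, if_neg hE, if_neg hF, if_neg hG, if_neg hH, if_neg hI, if_neg hJ, if_neg hK, if_neg hL, if_neg hM, if_neg hN, if_neg hO, if_neg hP, if_pos hQ]
  by_cases hR : c = 'R'
  · simp only [if_neg hA, if_neg hB, if_neg hC, if_neg hD, if_neg hE, if_neg hF, if_neg hG, if_neg hH, if_neg hI, if_neg hJ, if_neg hK, if_neg hL, if_neg hM, if_neg hN, if_neg hO, if_neg hP, if_neg hQ, if_pos hR]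
  by_cases hS : c = 'S'
  · simp only [if_neg hA, if_neg hB, if_neg hC, if_neg hD, if_neg hE, if_neg hF, if_neg hG, if_neg hH, if_neg hI, if_neg hJ, if_neg hK, if_neg hL, if_neg hM, if_neg hN, if_neg hO, if_neg hP, if_neg hQ, if_neg hR, if_pos hS]
  by_cases hT : c = 'T'
  · simp only [if_neg hA, if_neg hB, if_neg hC, if_neg hD, if_neg hE, if_neg hF, if_neg hG, if_neg hH, if_neg hI, if_neg hJ, if_neg hK, if_neg hL, if_neg hM, if_neg hN, if_neg hO, if_neg hP, if_neg hQ, if_neg hR, if_neg hS, if_pos hT]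
  by_cases hU : c = 'U'
  · simp only [if_neg hA, if_neg hB, if_neg hC, if_neg hD, if_neg hE, if_neg hF, if_neg hG, if_neg hH, if_neg hI, if_neg hJ, if_neg hK, if_neg hL, if_neg hM, if_neg hN, if_neg hO, if_neg hP, if_neg hQ, if_neg hR, if_neg hS, if_neg hT, if_pos hU]
  by_cases hV : c = 'V'
  · simp only [if_neg hA, if_neg hB, if_neg hC, if_neg hD, if_neg hE, if_neg hF, if_neg hG, if_neg hH, if_neg hI, if_neg hJ, if_neg hK, if_neg hL, if_neg hM, if_neg hN, if_neg hO, if_neg hP, if_neg hQ, if_neg hR, if_neg hS, if_neg hT, if_neg hU, if_pos hV]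
  by_cases hW : c = 'W'
  · simp only [if_neg hA, if_neg hB, if_neg hC, if_neg hD, if_neg hE, if_neg hF, if_neg hG, if_neg hH, if_neg hI, if_neg hJ, if_neg hK, if_neg hL, if_neg hM, if_neg hN, if_neg hO, if_neg hP, if_neg hQ, if_neg hR, if_neg hS, if_neg hT, if_neg hU, if_neg hV, if_pos hW]
  by_cases hX : c = 'X'
  · simp only [if_neg hA, if_neg hB, if_neg hC, if_neg hD, if_neg hE, if_neg hF, if_neg hG, if_neg hH, if_neg hI, if_neg hJ, if_neg hK, if_neg hL, if_neg hM, if_neg hN, if_neg hO, if_neg hP, if_neg hQ, if_neg hR, if_neg hS, if_neg hT, if_neg hU, if_neg hV, if_neg hW, if_pos hX]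
  by_cases hY : c = 'Y'
  · simp only [if_neg hA, if_neg hB, if_neg hC, if_neg hD, if_neg hE, if_neg hF, if_neg hG, if_neg hH, if_neg hI, if_neg hJ, if_neg hK, if_neg hL, if_neg hM, if_neg hN, if_neg hO, if_neg hP, if_neg hQ, if_neg hR, if_neg hS, if_neg hT, if_neg hU, if_neg hV, if_neg hW, if_neg hX, if_pos hY]
  by_cases hZ : c = 'Z'
  · simp only [if_neg hA, if_neg hB, if_neg hC, if_neg hD, if_neg hE, if_neg hF, if_neg hG, if_neg hH, if_neg hI, if_neg hJ, if_neg hK, if_neg hL, if_neg hM, if_neg hN, if_neg hO, if_neg hP, if_neg hQ, if_neg hR, if_neg hS, if_neg hT, if_neg hU, if_neg hV, if_neg hW, if_neg hX, if_neg hY, if_pos hZ]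
  simp only [if_neg hA, if_neg hB, if_neg hC, if_neg hD, if_neg hE, if_neg hF, if_neg hG, if_neg hH, if_neg hI, if_neg hJ, if_neg hK, if_neg hL, if_neg hM, if_neg hN, if_neg hO, if_neg hP, if_neg hQ, if_neg hR, if_neg hS, if_neg hT, if_neg hU, if_neg hV, if_neg hW, if_neg hX, if_neg hY, if_neg hZ]
  omega

theorem afold_eq (cs : List Char) : cs.foldl pvAStep 0 = (cs.map pvVal).sum := by
  have h : pvAStep = fun (s : Int) (c : Char) => s + pvVal c := by
    funext s c; exact pvAStep_eq s c
  rw [h, PySem.List.foldl_add]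
  ring

-- for each single character, B's weighted sum over the alphabet picks out A's per-character value
theorem perchar (c : Char) :
    ((PySem.List.enumerate pvAlphabet 1).map
      (fun pl => pl.1 * (if pl.2 = c then (1 : Int) else 0))).sum = pvVal c := by
  have halph : PySem.List.enumerate pvAlphabet 1
      = [(1, 'A'), (2, 'B'), (3, 'C'), (4, 'D'), (5, 'E'), (6, 'F'), (7, 'G'), (8, 'H'), (9, 'I'), (10, 'J'), (11, 'K'), (12, 'L'), (13, 'M'), (14, 'N'), (15, 'O'), (16, 'P'), (17, 'Q'), (18, 'R'), (19, 'S'), (20, 'T'), (21, 'U'), (22, 'V'), (23, 'W'), (24, 'X'), (25, 'Y'), (26, 'Z')] := by decide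
  rw [halph]
  simp only [List.map_cons, List.map_nil, List.sum_cons, List.sum_nil]
  by_cases hA : c = 'A'
  · subst hA; decide
  by_cases hB : c = 'B'
  · subst hB; decide
  by_cases hC : c = 'C'
  · subst hC; decide
  by_cases hD : c = 'D'
  · subst hD; decide
  by_cases hE : c = 'E'
  · subst hE; decide
  by_cases hF : c = 'F'
  · subst hF; decide
  by_cases hG : c = 'G'
  · subst hG; decide
  by_cases hH : c = 'H'
  · subst hH; decide
  by_cases hI : c = 'I'
  · subst hI; decide
  by_cases hJ : c = 'J'
  · subst hJ; decide
  by_cases hK : c = 'K'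
  · subst hK; decide
  by_cases hL : c = 'L'
  · subst hL; decide
  by_cases hM : c = 'M'
  · subst hM; decide
  by_cases hN : c = 'N'
  · subst hN; decide
  by_cases hO : c = 'O'
  · subst hO; decide
  by_cases hP : c = 'P'
  · subst hP; decide
  by_cases hQ : c = 'Q'
  · subst hQ; decide
  by_cases hR : c = 'R'
  · subst hR; decide
  by_cases hS : c = 'S'
  · subst hS; decide
  by_cases hT : c = 'T'
  · subst hT; decide
  by_cases hU : c = 'U'
  · subst hU; decide
  by_cases hV : c = 'V'
  · subst hV; decide
  by_cases hW : c = 'W'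
  · subst hW; decide
  by_cases hX : c = 'X'
  · subst hX; decide
  by_cases hY : c = 'Y'
  · subst hY; decide
  by_cases hZ : c = 'Z'
  · subst hZ; decide
  unfold pvVal
  simp only [if_neg (Ne.symm hA), if_neg (Ne.symm hB), if_neg (Ne.symm hC), if_neg (Ne.symm hD), if_neg (Ne.symm hE), if_neg (Ne.symm hF), if_neg (Ne.symm hG), if_neg (Ne.symm hH), if_neg (Ne.symm hI), if_neg (Ne.symm hJ), if_neg (Ne.symm hK), if_neg (Ne.symm hL), if_neg (Ne.symm hM), if_neg (Ne.symm hN), if_neg (Ne.symm hO), if_neg (Ne.symm hP), if_neg (Ne.symm hQ), if_neg (Ne.symm hR), if_neg (Ne.symm hS), if_neg (Ne.symm hT), if_neg (Ne.symm hU), if_neg (Ne.symm hV), if_neg (Ne.symm hW), if_neg (Ne.symm hX), if_neg (Ne.symm hY), if_neg (Ne.symm hZ), if_neg hA, if_neg hB, if_neg hC, if_neg hD, if_neg hE, if_neg hF, if_neg hG, if_neg hH, if_neg hI, if_neg hJ, if_neg hK, if_neg hL, if_neg hM, if_neg hN, if_neg hO, if_neg hP, if_neg hQ, if_neg hR, if_neg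 hS, if_neg hT, if_neg hU, if_neg hV, if_neg hW, if_neg hX, if_neg hY, if_neg hZ]
  norm_num

theorem sumswap (cs : List Char) :
    ((PySem.List.enumerate pvAlphabet 1).map
      (fun pl => pl.1 * (cs.count pl.2 : Int))).sum = (cs.map pvVal).sum := by
  induction cs with
  | nil => simp
  | cons c cs ih =>
    calc ((PySem.List.enumerate pvAlphabet 1).map
          (fun pl => pl.1 * ((c :: cs).count pl.2 : Int))).sum
        = ((PySem.List.enumerate pvAlphabet 1).map
          (fun pl => pl.1 * (cs.count pl.2 : Int)
            + pl.1 * (if pl.2 = c then (1:Int) else 0))).sum := by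
          apply congrArg List.sum
          apply List.map_congr_left
          intro pl _
          obtain ⟨p, l⟩ := pl
          have hc : (((c :: cs).count l : Nat) : Int) = (cs.count l : Int) + (if l = c then (1:Int) else 0) := by
            by_cases h : l = c
            · simp [h]
            · simp [h, Ne.symm h]
          show p * (((c :: cs).count l : Nat) : Int) = _
          rw [hc]; ring
      _ = ((PySem.List.enumerate pvAlphabet 1).map (fun pl => pl.1 * (cs.count pl.2 : Int))).sum
            + ((PySem.List.enumerate pvAlphabet 1).map (fun pl => pl.1 * (if pl.2 = c then (1:Int) else 0))).sum := by
          rw [← List.sum_map_add]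
      _ = (cs.map pvVal).sum + pvVal c := by rw [ih, perchar]
      _ = ((c :: cs).map pvVal).sum := by simp [List.map_cons]; ring

-- B's port, rewritten through the Counter lemmas into the weighted sum over the alphabet
theorem alt_eq (s : String) :
    sum_string_alpha_number_alt s
      = ((PySem.List.enumerate pvAlphabet 1).map
          (fun pl => pl.1 * (s.toList.count pl.2 : Int))).sum := by
  unfold sum_string_alpha_number_alt
  simp only [PySem.Dict.foldl_insert_getD_add_one_eq_counter, PySem.Dict.getD_counter]
  have h : (fun (total : Int) (pl : Int × Char) => total + pl.1 * ((s.toList.count pl.2 : Int)))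
      = fun total pl => total + (fun pl : Int × Char => pl.1 * (s.toList.count pl.2 : Int)) pl := rfl
  rw [h, PySem.List.foldl_add]
  ring

-- ===== VERDICT (by name: the statement is the Claim_ definition above) =====
theorem sum_string_alpha_number_spec : Claim_equal_sum_string_alpha_number := by
  intro string _
  unfold Spec_sum_string_alpha_number
  rw [alt_eq, sumswap, ← afold_eq]
  rfl
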